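-- pv_equiv track=rewrite | github.com/yys5584/pokemon-bot | config.py | get_division_info
-- ===== SOURCE A (Python) =====
-- RANKED_TIERS = [
--     ("unranked",   "언랭",     "❓", 0, 0),
--     ("bronze",     "브론즈",   "🥉", 2, 0),
--     ("silver",     "실버",     "🥈", 2, 200),
--     ("gold",       "골드",     "🏅", 2, 400),
--     ("platinum",   "플래티넘", "💎", 2, 600),
--     ("diamond",    "다이아",   "💠", 2, 800),
--     ("master",     "마스터",   "👑", 0, 1000),
--     # 챌린저: RP 기반이 아니라 마스터 Top 10 중 자동 부여
--     ("challenger", "챌린저",   "⚔️", 0, 99999),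
-- ]
--
-- DIVISION_RP = 100               # 디비전당 RP
--
-- def get_division_info(total_rp: int) -> tuple:
--     """총 RP → (tier_key, division, display_rp)
--     예: 378 → ("silver", 1, 78)  → 실버 I, 78 RP
--     예: 45  → ("bronze", 2, 45)  → 브론즈 II, 45 RP
--     예: 1250 → ("master", 0, 1250) → 마스터, 1250 RP
--     """
--     if total_rp >= 1000:
--         return ("master", 0, total_rp)
--     for t in reversed(RANKED_TIERS):
--         if t[0] in ("unranked", "master", "challenger"):
--             continue
--         if total_rp >= t[4]:  # base_rp
--             offset = total_rp - t[4]
--             div = 2 if offset < DIVISION_RP else 1  # II=하위, I=상위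
--             display_rp = offset % DIVISION_RP
--             return (t[0], div, display_rp)
--     return ("bronze", 2, 0)
-- ===== SOURCE B (Python) =====
-- _TIER_NAMES = ["bronze", "silver", "gold", "platinum", "diamond"]
--
-- def get_division_info(total_rp: int) -> tuple:
--     """Arithmetic bucketing: tier by // 200, division/display by the 200-RP offset."""
--     if total_rp >= 1000:
--         return ("master", 0, total_rp)
--     if total_rp < 0:
--         return ("bronze", 2, 0)
--     idx = total_rp // 200
--     offset = total_rp - idx * 200
--     return (_TIER_NAMES[idx], 2 if offset < 100 else 1, offset % 100)
-- ===== Notes on version B (the rewrite author's own statement) =====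
-- stated objective: simpler
-- what changed: Replaces the reversed linear scan over the RANKED_TIERS table with direct arithmetic bucketing (tier index = total_rp // 200, division and display RP from the offset).
import Mathlib
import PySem

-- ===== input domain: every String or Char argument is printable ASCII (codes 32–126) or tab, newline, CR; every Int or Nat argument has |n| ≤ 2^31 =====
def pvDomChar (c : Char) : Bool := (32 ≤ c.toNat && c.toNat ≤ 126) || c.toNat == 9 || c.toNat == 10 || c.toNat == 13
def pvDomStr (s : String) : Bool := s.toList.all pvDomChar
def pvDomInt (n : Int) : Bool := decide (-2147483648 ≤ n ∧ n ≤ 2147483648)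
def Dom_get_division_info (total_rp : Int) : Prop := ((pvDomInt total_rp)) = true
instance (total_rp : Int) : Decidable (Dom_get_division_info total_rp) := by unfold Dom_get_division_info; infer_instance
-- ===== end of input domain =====

-- B replaces A's reversed scan of the tier table by O(1) arithmetic bucketing (simpler); same value everywhere.

-- ===== PORT A =====
-- the module-level tier table (Korean name and emoji columns kept as data)
def RANKED_TIERS : List (String × String × String × Int × Int) :=
  [("unranked",   "언랭",     "❓", 0, 0),
   ("bronze",     "브론즈",   "🥉", 2, 0),
   ("silver",     "실버",     "🥈", 2, 200),
   ("gold",       "골드",     "🏅", 2, 400),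
   ("platinum",   "플래티넘", "💎", 2, 600),
   ("diamond",    "다이아",   "💠", 2, 800),
   ("master",     "마스터",   "👑", 0, 1000),
   ("challenger", "챌린저",   "⚔️", 0, 99999)]

def DIVISION_RP : Int := 100

-- the 'for t in reversed(RANKED_TIERS)' loop with its early return
def tierLoop (total_rp : Int) : List (String × String × String × Int × Int) → Option (String × Int × Int)
  | [] => none
  | t :: rest =>
    if t.1 = "unranked" ∨ t.1 = "master" ∨ t.1 = "challenger" then tierLoop total_rp rest
    else if total_rp ≥ t.2.2.2.2 then
      let offset := total_rp - t.2.2.2.2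
      some (t.1, if offset < DIVISION_RP then 2 else 1, PySem.Int.mod offset DIVISION_RP)
    else tierLoop total_rp rest

def get_division_info (total_rp : Int) : String × Int × Int :=
  if total_rp ≥ 1000 then ("master", 0, total_rp)
  else (tierLoop total_rp RANKED_TIERS.reverse).getD ("bronze", 2, 0)

-- ===== PORT B =====
def TIER_NAMES : List String := ["bronze", "silver", "gold", "platinum", "diamond"]

def get_division_info_alt (total_rp : Int) : String × Int × Int :=
  if total_rp ≥ 1000 then ("master", 0, total_rp)
  else if total_rp < 0 then ("bronze", 2, 0)
  else
    let idx := PySem.Int.floordiv total_rp 200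
    let offset := total_rp - idx * 200
    -- idx is provably in [0,4], so the Python list index never fails; getD's default is never used
    ((PySem.List.pyGet? TIER_NAMES idx).getD "",
     if offset < 100 then 2 else 1, PySem.Int.mod offset 100)

-- ===== PRECONDITION & SPEC =====
def Spec_get_division_info (total_rp : Int) (out : String × Int × Int) : Prop := out = get_division_info_alt total_rp
instance (total_rp : Int) (out : String × Int × Int) : Decidable (Spec_get_division_info total_rp out) := by unfold Spec_get_division_info; infer_instance

-- ===== CLAIM (what is proved, stated in full; the proofs are below) =====
def Claim_equal_get_division_info : Prop := ∀ (total_rp : Int), Dom_get_division_info total_rp → Spec_get_division_info total_rp (get_division_info total_rp)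

-- ===== LEMMAS AND PROOFS =====

-- bucket lemma: for the b-th 200-RP bucket, both sides give the literal tier b
theorem bucket_case (rp : Int) (b : Int) (hb0 : 0 ≤ b) (hb : b < 5)
    (hlo : b * 200 ≤ rp) (hhi : rp < (b + 1) * 200) :
    get_division_info rp = get_division_info_alt rp := by
  have hidx : PySem.Int.floordiv rp 200 = b := by
    rw [PySem.Int.floordiv_eq_ediv_of_pos (by norm_num)]
    omega
  interval_cases b <;> norm_num at hlo hhi hidx <;>
  · simp [get_division_info, get_division_info_alt, tierLoop, RANKED_TIERS,
      DIVISION_RP, hidx, TIER_NAMES, PySem.List.pyGet?, PySem.List.pyIdx?]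
    split_ifs <;> first | rfl | omega

-- ===== VERDICT (by name: the statement is the Claim_ definition above) =====
theorem get_division_info_spec : Claim_equal_get_division_info := by
  intro rp _
  unfold Spec_get_division_info
  by_cases h1000 : rp ≥ 1000
  · simp [get_division_info, get_division_info_alt, h1000]
  · by_cases hneg : rp < 0
    · simp [get_division_info, get_division_info_alt, tierLoop, RANKED_TIERS, hneg,
        show ¬ rp ≥ 1000 from h1000, show ¬ (800:Int) ≤ rp by omega,
        show ¬ (600:Int) ≤ rp by omega, show ¬ (400:Int) ≤ rp by omega,
        show ¬ (200:Int) ≤ rp by omega, show ¬ (0:Int) ≤ rp by omega]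
    · -- 0 ≤ rp < 1000: split into the five 200-RP buckets
      have : ∃ b : Int, 0 ≤ b ∧ b < 5 ∧ b * 200 ≤ rp ∧ rp < (b + 1) * 200 := by
        by_cases a0 : rp < 200
        · exact ⟨0, by omega, by omega, by omega, by omega⟩
        · by_cases a1 : rp < 400
          · exact ⟨1, by omega, by omega, by omega, by omega⟩
          · by_cases a2 : rp < 600
            · exact ⟨2, by omega, by omega, by omega, by omega⟩
            · by_cases a3 : rp < 800
              · exact ⟨3, by omega, by omega, by omega, by omega⟩
              · exact ⟨4, by omega, by omega, by omega, by omega⟩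
      obtain ⟨b, hb0, hb, hlo, hhi⟩ := this
      exact bucket_case rp b hb0 hb hlo hhi
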